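-- pv_equiv track=rewrite | github.com/brianjp93/CodeEval | palindromicRanges/palindromicRanges.py | int_pals
-- ===== SOURCE A (Python) =====
-- def int_pals(begin, end):
--     total = 0
--     num_int_pals = 0
--     for i in range(begin, end + 1):
--         num = str(i)
--         if num == num[::-1]:
--             total += 1
--     if total == 1:
--         return 1
--     elif total % 2 != 0:
--         adding = 2
--         while adding <= total:
--             num_int_pals += adding
--             adding += 2
--     else:
--         adding = 1
--         while adding <= total:
--             num_int_pals += adding
--             adding += 2
--     return num_int_pals
-- ===== SOURCE B (Python) =====
-- def int_pals(begin, end):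
--     total = 0
--     for i in range(begin, end + 1):
--         if i >= 0:
--             n, r = i, 0
--             while n > 0:
--                 r = r * 10 + n % 10
--                 n //= 10
--             if r == i:
--                 total += 1
--     if total == 1:
--         return 1
--     if total % 2 != 0:
--         m = (total - 1) // 2
--         return m * (m + 1)
--     h = total // 2
--     return h * h
-- ===== Notes on version B (the rewrite author's own statement) =====
-- stated objective: alternative
-- what changed: B tests palindromicity by arithmetic digit reversal (no string construction/slicing, negatives skipped by sign test) and replaces A's two accumulation while-loops over the series by closed-form formulas m*(m+1) / (total//2)**2.
import Mathlib
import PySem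

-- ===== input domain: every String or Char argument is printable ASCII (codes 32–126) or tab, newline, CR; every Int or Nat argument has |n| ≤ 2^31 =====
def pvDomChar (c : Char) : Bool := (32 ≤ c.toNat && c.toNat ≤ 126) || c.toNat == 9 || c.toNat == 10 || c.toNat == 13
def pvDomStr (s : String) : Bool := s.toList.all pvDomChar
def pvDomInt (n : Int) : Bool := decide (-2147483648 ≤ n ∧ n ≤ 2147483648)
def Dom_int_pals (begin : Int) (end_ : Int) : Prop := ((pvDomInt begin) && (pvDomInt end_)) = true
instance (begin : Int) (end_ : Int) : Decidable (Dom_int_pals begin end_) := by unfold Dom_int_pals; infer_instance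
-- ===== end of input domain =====

-- B replaces A's string-slicing palindrome test by arithmetic digit reversal and A's
-- series accumulation while-loops by closed-form formulas (alternative algorithm, same scan cost).

-- ===== PORT A =====
-- Python: adding = 2 (or 1); while adding <= total: num_int_pals += adding; adding += 2
def pvWhileAdd (total adding acc : Int) : Int :=
  if adding ≤ total then pvWhileAdd total (adding + 2) (acc + adding) else acc
termination_by (total + 2 - adding).toNat
decreasing_by omega

def int_pals (begin : Int) (end_ : Int) : Int :=
  let total := (PySem.List.pyRange begin (end_ + 1) 1).foldl
    (fun total i =>
      let num := PySem.Int.toStr i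
      if num == (PySem.Str.slice? num none none (-1)).getD "" then total + 1 else total) 0
  if total = 1 then 1
  else if PySem.Int.mod total 2 ≠ 0 then pvWhileAdd total 2 0
  else pvWhileAdd total 1 0

-- ===== PORT B =====
-- Python: n, r = i, 0; while n > 0: r = r*10 + n%10; n //= 10
def pvRevAcc (n r : Int) : Int :=
  if 0 < n then pvRevAcc (PySem.Int.floordiv n 10) (r * 10 + PySem.Int.mod n 10) else r
termination_by n.toNat
decreasing_by
  rw [PySem.Int.floordiv_eq_ediv_of_pos (by norm_num)]; omega

def int_pals_alt (begin : Int) (end_ : Int) : Int :=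
  let total := (PySem.List.pyRange begin (end_ + 1) 1).foldl
    (fun total i =>
      if 0 ≤ i then
        if pvRevAcc i 0 = i then total + 1 else total
      else total) 0
  if total = 1 then 1
  else if PySem.Int.mod total 2 ≠ 0 then
    let m := PySem.Int.floordiv (total - 1) 2
    m * (m + 1)
  else
    let h := PySem.Int.floordiv total 2
    h * h

-- ===== PRECONDITION & SPEC =====
def Spec_int_pals (begin : Int) (end_ : Int) (out : Int) : Prop := out = int_pals_alt begin end_
instance (begin : Int) (end_ : Int) (out : Int) : Decidable (Spec_int_pals begin end_ out) := by unfold Spec_int_pals; infer_instance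

-- ===== CLAIM (what is proved, stated in full; the proofs are below) =====
def Claim_equal_int_pals : Prop := ∀ (begin : Int) (end_ : Int), Dom_int_pals begin end_ → Spec_int_pals begin end_ (int_pals begin end_)

-- ===== LEMMAS AND PROOFS =====

-- Nat.toDigitsCore in terms of Nat.digits
lemma pv_toDigitsCore_eq (f : Nat) : ∀ (n : Nat) (ds : List Char), 0 < n → n < 10 ^ f →
    Nat.toDigitsCore 10 f n ds = ((Nat.digits 10 n).map Nat.digitChar).reverse ++ ds := by
  induction f with
  | zero => intro n ds h1 h2; simp at h2; omega
  | succ f ih =>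
    intro n ds h1 h2
    rw [Nat.toDigitsCore]
    split
    · rename_i h0
      rw [Nat.digits_def' (by norm_num : (1:Nat) < 10) h1, h0]
      simp
    · rename_i h0
      have hlt : n / 10 < 10 ^ f := by
        rw [Nat.div_lt_iff_lt_mul (by norm_num)]
        calc n < 10 ^ (f + 1) := h2
        _ = 10 ^ f * 10 := by rw [pow_succ]
      rw [ih (n / 10) _ (Nat.pos_of_ne_zero h0) hlt]
      rw [Nat.digits_def' (by norm_num : (1:Nat) < 10) h1]
      simp

lemma pv_toDigits_eq (n : Nat) (h : 0 < n) :
    Nat.toDigits 10 n = ((Nat.digits 10 n).map Nat.digitChar).reverse := by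
  have hf : n < 10 ^ (n + 1) := by
    calc n < 10 ^ n := Nat.lt_pow_self (by norm_num)
    _ ≤ 10 ^ (n + 1) := Nat.pow_le_pow_right (by norm_num) (Nat.le_succ n)
  rw [Nat.toDigits, pv_toDigitsCore_eq (n + 1) n [] h hf, List.append_nil]

lemma pv_digitChar_inj : ∀ a < 10, ∀ b < 10, Nat.digitChar a = Nat.digitChar b → a = b := by decide

lemma pv_digitChar_ne_dash : ∀ d < 10, Nat.digitChar d ≠ '-' := by decide

lemma pv_map_dc_inj : ∀ (xs ys : List Nat), (∀ d ∈ xs, d < 10) → (∀ d ∈ ys, d < 10) →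
    xs.map Nat.digitChar = ys.map Nat.digitChar → xs = ys := by
  intro xs
  induction xs with
  | nil => intro ys _ _ h; cases ys with
    | nil => rfl
    | cons b u => simp at h
  | cons a t ih =>
    intro ys hx hy h
    cases ys with
    | nil => simp at h
    | cons b u =>
      simp only [List.map_cons, List.cons.injEq] at h
      have ha := pv_digitChar_inj a (hx a (by simp)) b (hy b (by simp)) h.1
      have ht := ih u (fun d hd => hx d (by simp [hd])) (fun d hd => hy d (by simp [hd])) h.2
      rw [ha, ht]

lemma pv_ofDigits_inj : ∀ (xs ys : List Nat), (∀ d ∈ xs, d < 10) → (∀ d ∈ ys, d < 10) →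
    xs.length = ys.length → Nat.ofDigits 10 xs = Nat.ofDigits 10 ys → xs = ys := by
  intro xs
  induction xs with
  | nil => intro ys _ _ hl _; cases ys with
    | nil => rfl
    | cons b u => simp at hl
  | cons a t ih =>
    intro ys hx hy hl he
    cases ys with
    | nil => simp at hl
    | cons b u =>
      simp only [Nat.ofDigits_cons] at he
      have ha : a < 10 := hx a (by simp)
      have hb : b < 10 := hy b (by simp)
      have hab : a = b ∧ Nat.ofDigits 10 t = Nat.ofDigits 10 u := by omega
      have ht := ih u (fun d hd => hx d (by simp [hd])) (fun d hd => hy d (by simp [hd]))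
        (by simpa using hl) hab.2
      rw [hab.1, ht]

-- arithmetic reversal computes ofDigits of the reversed digit list
lemma pv_revAcc_eq (m : Nat) : ∀ (r : Int),
    pvRevAcc (m : Int) r
      = ((Nat.ofDigits 10 (Nat.digits 10 m).reverse : Nat) : Int)
        + r * 10 ^ (Nat.digits 10 m).length := by
  induction m using Nat.strong_induction_on with
  | _ m ih =>
    intro r
    rw [pvRevAcc]
    split
    · rename_i hpos
      have hm : 0 < m := by exact_mod_cast hpos
      have h10 : (10 : Int) = ((10 : Nat) : Int) := by norm_num
      rw [h10, PySem.Int.floordiv_natCast, PySem.Int.mod_natCast]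
      rw [ih (m / 10) (Nat.div_lt_self hm (by norm_num))]
      rw [Nat.digits_def' (by norm_num : (1:Nat) < 10) hm]
      simp only [List.reverse_cons, Nat.ofDigits_append, List.length_reverse, List.length_cons]
      push_cast [Nat.ofDigits_cons, Nat.ofDigits_nil]
      ring
    · rename_i hneg
      have hm : m = 0 := by omega
      subst hm
      simp

-- A's Bool test, reduced to a palindrome condition on the character list
lemma pv_strtest_iff (i : Int) :
    ((PySem.Int.toStr i == (PySem.Str.slice? (PySem.Int.toStr i) none none (-1)).getD "") = true) ↔
    PySem.Int.toChars i = (PySem.Int.toChars i).reverse := by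
  rw [PySem.Str.slice?_none_none_neg_one, Option.getD_some, beq_iff_eq]
  constructor
  · intro h
    have := congrArg String.toList h
    rwa [String.toList_ofList, PySem.Int.toList_toStr] at this
  · intro h
    have : (PySem.Int.toStr i).toList = (PySem.Int.toStr i).toList.reverse := by
      rw [PySem.Int.toList_toStr]; exact h
    calc PySem.Int.toStr i = String.ofList (PySem.Int.toStr i).toList := String.ofList_toList.symm
    _ = String.ofList (PySem.Int.toStr i).toList.reverse := by rw [← this]

-- digit-list palindromicity transfers through digitChar
lemma pv_digits_pal_iff (m : Nat) :
    ((Nat.digits 10 m).map Nat.digitChar = ((Nat.digits 10 m).map Nat.digitChar).reverse) ↔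
    Nat.digits 10 m = (Nat.digits 10 m).reverse := by
  constructor
  · intro h
    apply pv_map_dc_inj _ _ (fun d hd => Nat.digits_lt_base (by norm_num) hd)
      (fun d hd => Nat.digits_lt_base (by norm_num) (List.mem_reverse.mp hd))
    rw [List.map_reverse]; exact h
  · intro h
    rw [← List.map_reverse, ← h]

-- pointwise: A's string test equals B's arithmetic test
lemma pv_test_iff (i : Int) :
    ((PySem.Int.toStr i == (PySem.Str.slice? (PySem.Int.toStr i) none none (-1)).getD "") = true) ↔
    (0 ≤ i ∧ pvRevAcc i 0 = i) := by
  rw [pv_strtest_iff]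
  by_cases hneg : i < 0
  · constructor
    · intro h
      exfalso
      have hna : 0 < i.natAbs := by omega
      have hch : PySem.Int.toChars i = '-' :: Nat.toDigits 10 i.natAbs := by
        simp [PySem.Int.toChars, if_pos hneg]
      rw [hch, pv_toDigits_eq _ hna, Nat.digits_def' (by norm_num : (1:Nat) < 10) hna] at h
      have hx : ('-' :: (((i.natAbs % 10) :: Nat.digits 10 (i.natAbs / 10)).map Nat.digitChar).reverse).reverse
          = Nat.digitChar (i.natAbs % 10) :: ((Nat.digits 10 (i.natAbs / 10)).map Nat.digitChar ++ ['-']) := by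
        simp
      rw [hx] at h
      injection h with h1 _
      exact pv_digitChar_ne_dash (i.natAbs % 10) (Nat.mod_lt _ (by norm_num)) h1.symm
    · intro h; omega
  · have hpos : 0 ≤ i := not_lt.mp hneg
    -- 0 ≤ i : work with m = i.toNat
    obtain ⟨m, rfl⟩ : ∃ m : Nat, i = (m : Int) := ⟨i.toNat, (Int.toNat_of_nonneg hpos).symm⟩
    have hch : PySem.Int.toChars (m : Int) = Nat.toDigits 10 m := by
      simp [PySem.Int.toChars, not_lt.mpr hpos]
    rcases Nat.eq_zero_or_pos m with hm | hm
    · subst hm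
      constructor
      · intro _; refine ⟨by norm_num, ?_⟩; rw [pvRevAcc]; simp
      · intro _; rw [hch]; decide
    · rw [hch, pv_toDigits_eq m hm]
      have harith : pvRevAcc (m : Int) 0 = (m : Int) ↔
          Nat.digits 10 m = (Nat.digits 10 m).reverse := by
        rw [pv_revAcc_eq m 0]
        simp only [zero_mul, add_zero]
        constructor
        · intro h
          have hofd : Nat.ofDigits 10 (Nat.digits 10 m).reverse = Nat.ofDigits 10 (Nat.digits 10 m) := by
            rw [Nat.ofDigits_digits]; exact_mod_cast h
          have := pv_ofDigits_inj (Nat.digits 10 m) (Nat.digits 10 m).reverse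
            (fun d hd => Nat.digits_lt_base (by norm_num) hd)
            (fun d hd => Nat.digits_lt_base (by norm_num) (List.mem_reverse.mp hd))
            (by simp) hofd.symm
          exact this
        · intro h
          rw [← h, Nat.ofDigits_digits]
      rw [List.reverse_reverse, eq_comm, pv_digits_pal_iff m]
      constructor
      · intro h
        exact ⟨by positivity, harith.2 h⟩
      · intro h
        exact harith.1 h.2

-- closed form of the while loop
def pvClosedSum (total adding : Int) : Int :=
  if adding ≤ total then
    ((total - adding) / 2 + 1) * adding + ((total - adding) / 2 + 1) * ((total - adding) / 2)
  else 0

lemma pvClosedSum_step (total adding : Int) (h : adding ≤ total) :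
    pvClosedSum total adding = adding + pvClosedSum total (adding + 2) := by
  unfold pvClosedSum
  rw [if_pos h]
  split
  · rename_i h2
    have hq : (total - (adding + 2)) / 2 = (total - adding) / 2 - 1 := by omega
    rw [hq]; ring
  · rename_i h2
    have hq : (total - adding) / 2 = 0 := by omega
    rw [hq]; ring

lemma pv_whileAdd_closed (k : Nat) : ∀ (total adding acc : Int), (total + 2 - adding).toNat = k →
    pvWhileAdd total adding acc = acc + pvClosedSum total adding := by
  induction k using Nat.strong_induction_on with
  | _ k ih =>
    intro total adding acc hk
    rw [pvWhileAdd]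
    split
    · rename_i h
      rw [ih (total + 2 - (adding + 2)).toNat (by omega) total (adding + 2) (acc + adding) rfl]
      rw [pvClosedSum_step total adding h]
      ring
    · rename_i h
      rw [pvClosedSum, if_neg h, add_zero]

lemma pv_foldl_nonneg (f : Int → Int → Int) (hf : ∀ t i, t ≤ f t i) :
    ∀ (l : List Int) (t : Int), t ≤ l.foldl f t := by
  intro l
  induction l with
  | nil => intro t; simp
  | cons x xs ih => intro t; exact le_trans (hf t x) (ih (f t x))

lemma pv_final_eq (total : Int) (h : 0 ≤ total) :
    (if total = 1 then 1
     else if PySem.Int.mod total 2 ≠ 0 then pvWhileAdd total 2 0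
     else pvWhileAdd total 1 0) =
    (if total = 1 then 1
     else if PySem.Int.mod total 2 ≠ 0 then
        PySem.Int.floordiv (total - 1) 2 * (PySem.Int.floordiv (total - 1) 2 + 1)
     else PySem.Int.floordiv total 2 * PySem.Int.floordiv total 2) := by
  rw [PySem.Int.mod_eq_emod_of_pos (by norm_num),
    PySem.Int.floordiv_eq_ediv_of_pos (by norm_num),
    PySem.Int.floordiv_eq_ediv_of_pos (by norm_num)]
  by_cases h1 : total = 1
  · rw [if_pos h1, if_pos h1]
  rw [if_neg h1, if_neg h1]
  by_cases h2 : total % 2 ≠ 0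
  · rw [if_pos h2, if_pos h2]
    have h3 : 3 ≤ total := by omega
    rw [pv_whileAdd_closed (total + 2 - 2).toNat total 2 0 rfl, zero_add,
      pvClosedSum, if_pos (by omega : (2:Int) ≤ total)]
    have hm : (total - 1) / 2 = (total - 2) / 2 + 1 := by omega
    rw [hm]; ring
  · rw [if_neg h2, if_neg h2]
    rw [not_ne_iff] at h2
    rcases eq_or_lt_of_le h with h0 | h0
    · rw [pv_whileAdd_closed (total + 2 - 1).toNat total 1 0 rfl, zero_add,
        pvClosedSum, if_neg (by omega), ← h0]
      norm_num
    · rw [pv_whileAdd_closed (total + 2 - 1).toNat total 1 0 rfl, zero_add,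
        pvClosedSum, if_pos (by omega : (1:Int) ≤ total)]
      have hq : (total - 1) / 2 = total / 2 - 1 := by omega
      rw [hq]; ring

-- ===== VERDICT (by name: the statement is the Claim_ definition above) =====
theorem int_pals_spec : Claim_equal_int_pals := by
  intro begin end_ _
  unfold Spec_int_pals int_pals int_pals_alt
  have hfun : (fun (total i : Int) =>
      let num := PySem.Int.toStr i
      if num == (PySem.Str.slice? num none none (-1)).getD "" then total + 1 else total)
    = (fun (total i : Int) =>
      if 0 ≤ i then if pvRevAcc i 0 = i then total + 1 else total else total) := by
    funext t i
    show (if (PySem.Int.toStr i == (PySem.Str.slice? (PySem.Int.toStr i) none none (-1)).getD "") = true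
      then t + 1 else t)
      = (if 0 ≤ i then if pvRevAcc i 0 = i then t + 1 else t else t)
    rw [if_congr (pv_test_iff i) rfl rfl]
    by_cases h1 : 0 ≤ i
    · by_cases h2 : pvRevAcc i 0 = i
      · rw [if_pos ⟨h1, h2⟩, if_pos h1, if_pos h2]
      · rw [if_neg (by tauto), if_pos h1, if_neg h2]
    · rw [if_neg (by tauto), if_neg h1]
  rw [hfun]
  exact pv_final_eq _ (pv_foldl_nonneg _ (by
    intro t i
    by_cases h1 : 0 ≤ i
    · by_cases h2 : pvRevAcc i 0 = i
      · rw [if_pos h1, if_pos h2]; omega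
      · rw [if_pos h1, if_neg h2]
    · rw [if_neg h1]) _ 0)
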